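-- pv_equiv track=rewrite | github.com/maxcbarn/UNI-stowage | aproximative.py | get_center_out_order
-- ===== SOURCE A (Python) =====
-- from typing import List, Tuple, TypedDict, Optional, Dict
--
-- def get_center_out_order(n: int) -> List[int]:
--     """
--     [CITATION] Improved search order inspired by Ambrosino et al. (2004).
--     Addresses 'Equilibrium Constraints' via center-out filling.
--     """
--     res: List[int] = []
--     left, right = (n - 1) // 2, (n - 1) // 2 + 1
--
--     if left >= 0 and left == (n - 1) / 2:
--         res.append(left)
--         left -= 1
--
--     while left >= 0 or right < n:
--         if right < n:
--             res.append(right)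
--             right += 1
--         if left >= 0:
--             res.append(left)
--             left -= 1
--
--     if not res and n > 0:
--         return list(range(n))
--     return res
-- ===== SOURCE B (Python) =====
-- def get_center_out_order(n: int) -> list:
--     # Sort the indices 0..n-1 by distance from the center (n-1)/2, with the
--     # right-hand one of two equidistant indices first; abs(4*i - 2*n + 1) is
--     # an exact integer encoding of that (distance, side) key.
--     return sorted(range(n), key=lambda i: abs(4 * i - 2 * n + 1))
-- ===== Notes on version B (the rewrite author's own statement) =====
-- stated objective: simpler
-- what changed: Replaces the two-pointer outward-expansion loop (plus odd-center pre-step and dead fallback branch) with a single sort of range(n) under an exact integer (distance-from-center, right-first) key.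
import Mathlib
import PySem

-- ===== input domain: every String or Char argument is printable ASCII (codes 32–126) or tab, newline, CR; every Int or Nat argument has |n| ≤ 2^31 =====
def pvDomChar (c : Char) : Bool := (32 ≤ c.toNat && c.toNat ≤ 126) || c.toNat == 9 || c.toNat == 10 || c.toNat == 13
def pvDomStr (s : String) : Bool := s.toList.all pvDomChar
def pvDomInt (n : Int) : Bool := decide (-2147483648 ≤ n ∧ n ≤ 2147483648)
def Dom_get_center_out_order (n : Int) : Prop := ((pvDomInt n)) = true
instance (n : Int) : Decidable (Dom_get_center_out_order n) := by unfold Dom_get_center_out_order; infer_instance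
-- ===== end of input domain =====

-- B replaces A's two-pointer outward-expansion loop by one sort of range(n)
-- under an exact integer (distance-from-center, right-first) key: simpler.


-- ===== PORT A =====
-- the 'while left >= 0 or right < n' loop: returns the suffix the loop appends;
-- structural recursion on a fuel that equals the loop's decreasing measure
def pvLoopAFuel (n : Int) : Nat → Int → Int → List Int
  | 0, _, _ => []
  | f + 1, l, r =>
    if 0 ≤ l ∨ r < n then
      (if r < n then [r] else []) ++ (if 0 ≤ l then [l] else []) ++
        pvLoopAFuel n f (if 0 ≤ l then l - 1 else l) (if r < n then r + 1 else r)
    else []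

def pvLoopA (n l r : Int) : List Int :=
  pvLoopAFuel n ((l + 1).toNat + (n - r).toNat) l r

def get_center_out_order (n : Int) : List Int :=
  let left := PySem.Int.floordiv (n - 1) 2
  let right := left + 1
  -- 'left == (n - 1) / 2': the float test is exact for |n| ≤ 2^31 (≪ 2^53) and holds iff n - 1 = 2 * left
  let s := if 0 ≤ left ∧ n - 1 = 2 * left then ([left], left - 1) else (([] : List Int), left)
  let res := s.1 ++ pvLoopA n s.2 right
  if res = [] ∧ 0 < n then PySem.List.pyRange 0 n 1 else res

-- ===== PORT B =====
def get_center_out_order_alt (n : Int) : List Int :=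
  PySem.List.sorted (PySem.List.pyRange 0 n 1) (fun i => |4 * i - 2 * n + 1|) false

-- ===== PRECONDITION & SPEC =====
def Spec_get_center_out_order (n : Int) (out : List Int) : Prop := out = get_center_out_order_alt n
instance (n : Int) (out : List Int) : Decidable (Spec_get_center_out_order n out) := by unfold Spec_get_center_out_order; infer_instance

-- ===== CLAIM (what is proved, stated in full; the proofs are below) =====
def Claim_equal_get_center_out_order : Prop := ∀ (n : Int), Dom_get_center_out_order n → Spec_get_center_out_order n (get_center_out_order n)

-- ===== LEMMAS AND PROOFS =====

lemma pvLoopAFuel_congr (n : Int) : ∀ (f g : Nat) (l r : Int),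
    (l + 1).toNat + (n - r).toNat ≤ f → (l + 1).toNat + (n - r).toNat ≤ g →
    pvLoopAFuel n f l r = pvLoopAFuel n g l r := by
  intro f
  induction f with
  | zero =>
    intro g l r hf hg
    cases g with
    | zero => rfl
    | succ g' =>
      show ([] : List Int) = pvLoopAFuel n (g' + 1) l r
      rw [pvLoopAFuel, if_neg (by omega : ¬(0 ≤ l ∨ r < n))]
  | succ f' ih =>
    intro g l r hf hg
    cases g with
    | zero =>
      show pvLoopAFuel n (f' + 1) l r = ([] : List Int)
      rw [pvLoopAFuel, if_neg (by omega : ¬(0 ≤ l ∨ r < n))]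
    | succ g' =>
      rw [pvLoopAFuel, pvLoopAFuel]
      by_cases h : 0 ≤ l ∨ r < n
      · rw [if_pos h, if_pos h]
        rw [ih g' (if 0 ≤ l then l - 1 else l) (if r < n then r + 1 else r)
            (by split_ifs <;> omega) (by split_ifs <;> omega)]
      · rw [if_neg h, if_neg h]

lemma pvLoopA_nil (n l r : Int) (hl : l < 0) (hr : n ≤ r) : pvLoopA n l r = [] := by
  unfold pvLoopA
  rw [show (l + 1).toNat + (n - r).toNat = 0 from by omega]
  rfl

lemma pvLoopA_step (n : Int) (m : Nat) :
    pvLoopA n (m : Int) (n - 1 - m) =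
      (n - 1 - m) :: (m : Int) :: pvLoopA n ((m : Int) - 1) (n - 1 - ((m : Int) - 1)) := by
  unfold pvLoopA
  rw [show ((m : Int) + 1).toNat + (n - (n - 1 - (m : Int))).toNat = (2 * m + 1) + 1 from by omega]
  rw [pvLoopAFuel]
  have h1 : (0:Int) ≤ (m:Int) := by positivity
  have h2 : n - 1 - (m:Int) < n := by omega
  rw [if_pos (Or.inl h1), if_pos h1, if_pos h2]
  rw [show ((m : Int) - 1 + 1).toNat + (n - (n - 1 - ((m : Int) - 1))).toNat = 2 * m from by omega]
  rw [pvLoopAFuel_congr n (2 * m + 1) (2 * m) (if 0 ≤ (m:Int) then (m:Int) - 1 else (m:Int))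
        (if n - 1 - (m:Int) < n then n - 1 - (m:Int) + 1 else n - 1 - (m:Int))
        (by split_ifs <;> omega) (by split_ifs <;> omega)]
  rw [if_pos h1, if_pos h2, show n - 1 - (m:Int) + 1 = n - 1 - ((m:Int) - 1) from by omega]
  rfl

lemma pvLoopA_perm (n : Int) : ∀ (m : Nat), 2 * (m : Int) + 2 ≤ n →
    (pvLoopA n (m : Int) (n - 1 - m)).Perm
      (PySem.List.pyRange 0 ((m : Int) + 1) 1 ++ PySem.List.pyRange (n - 1 - m) n 1) := by
  intro m
  induction m with
  | zero =>
    intro h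
    rw [pvLoopA_step n 0, pvLoopA_nil n _ _ (by omega) (by omega)]
    push_cast
    rw [show PySem.List.pyRange 0 1 1 = [(0:Int)] from by decide]
    rw [PySem.List.pyRange_one_cons (by omega), PySem.List.pyRange_one_eq_nil (by omega)]
    exact List.Perm.swap _ _ _
  | succ k ih =>
    intro h
    have hn : 2 * (k : Int) + 2 + 2 ≤ n := by push_cast at h; omega
    have hperm := ih (by omega)
    rw [pvLoopA_step n (k + 1),
        show ((k + 1 : Nat) : Int) - 1 = ((k : Nat) : Int) from by push_cast; omega]
    push_cast
    refine ((hperm.cons _).cons _).trans ?_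
    have r1 : PySem.List.pyRange 0 ((k:Int) + 1 + 1) 1 =
        PySem.List.pyRange 0 ((k:Int) + 1) 1 ++ PySem.List.pyRange ((k:Int) + 1) ((k:Int) + 1 + 1) 1 :=
      PySem.List.pyRange_one_append 0 ((k:Int) + 1) ((k:Int) + 1 + 1) (by omega) (by omega)
    have r2 : PySem.List.pyRange ((k:Int) + 1) ((k:Int) + 1 + 1) 1 = [((k:Int) + 1)] :=
      PySem.List.pyRange_one_singleton _
    have r3 : PySem.List.pyRange (n - 1 - ((k:Int) + 1)) n 1 =
        (n - 1 - ((k:Int) + 1)) :: PySem.List.pyRange (n - 1 - (k:Int)) n 1 := by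
      rw [PySem.List.pyRange_one_cons (by omega),
          show n - 1 - ((k:Int) + 1) + 1 = n - 1 - (k:Int) from by omega]
    rw [r1, r2, r3]
    refine List.perm_iff_count.mpr (fun a => ?_)
    simp only [List.count_append, List.count_cons, List.count_nil]
    omega

lemma pvLoopA_pairwise (n : Int) : ∀ (m : Nat), 2 * (m : Int) + 2 ≤ n →
    (pvLoopA n (m : Int) (n - 1 - m)).Pairwise (fun a b => |4 * a - 2 * n + 1| < |4 * b - 2 * n + 1|) ∧
    ∀ x ∈ pvLoopA n (m : Int) (n - 1 - m), 2 * (n - 1 - 2 * m) - 1 ≤ |4 * x - 2 * n + 1| := by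
  intro m
  induction m with
  | zero =>
    intro h
    rw [pvLoopA_step n 0, pvLoopA_nil n _ _ (by omega) (by omega)]
    constructor
    · refine List.pairwise_cons.mpr ⟨?_, List.pairwise_cons.mpr ⟨by simp, List.Pairwise.nil⟩⟩
      intro b hb
      simp at hb
      subst hb
      push_cast
      rw [abs_of_nonneg (by omega), abs_of_nonpos (by omega)]
      omega
    · intro x hx
      simp at hx
      push_cast at hx ⊢
      rcases hx with hx | hx <;> subst hx
      · rw [abs_of_nonneg (by omega)]; omega
      · rw [abs_of_nonpos (by omega)]; omega
  | succ k ih =>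
    intro h
    have hn : 2 * (k : Int) + 2 + 2 ≤ n := by push_cast at h; omega
    obtain ⟨ihp, ihb⟩ := ih (by omega)
    rw [pvLoopA_step n (k + 1),
        show ((k + 1 : Nat) : Int) - 1 = ((k : Nat) : Int) from by push_cast; omega]
    push_cast
    have kr : |4 * (n - 1 - ((k:Int) + 1)) - 2 * n + 1| = 2 * (n - 1 - 2 * ((k:Int) + 1)) - 1 := by
      rw [abs_of_nonneg (by omega)]; omega
    have kl : |4 * ((k:Int) + 1) - 2 * n + 1| = 2 * (n - 1 - 2 * ((k:Int) + 1)) + 1 := by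
      rw [abs_of_nonpos (by omega)]; omega
    refine ⟨List.pairwise_cons.mpr ⟨?_, List.pairwise_cons.mpr ⟨?_, ihp⟩⟩, ?_⟩
    · intro b hb
      rw [List.mem_cons] at hb
      rcases hb with hb | hb
      · subst hb; rw [kr, kl]; omega
      · have := ihb b hb; rw [kr]; omega
    · intro b hb
      have := ihb b hb; rw [kl]; omega
    · intro x hx
      rcases List.mem_cons.mp hx with hx | hx
      · subst hx; exact le_of_eq kr.symm
      rcases List.mem_cons.mp hx with hx | hx
      · subst hx; rw [kl]; omega
      · have := ihb x hx; omega

-- the key used by B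
lemma main_eq (n : Int) : get_center_out_order n = get_center_out_order_alt n := by
  have hL : PySem.Int.floordiv (n - 1) 2 = (n - 1) / 2 :=
    PySem.Int.floordiv_eq_ediv_of_pos (by norm_num)
  simp only [get_center_out_order, get_center_out_order_alt, hL]
  by_cases hn : n ≤ 0
  · -- empty result on both sides
    rw [if_neg (by omega : ¬(0 ≤ (n - 1) / 2 ∧ n - 1 = 2 * ((n - 1) / 2)))]
    simp only [List.nil_append]
    rw [pvLoopA_nil n _ _ (by omega) (by omega)]
    rw [if_neg (by omega : ¬(([] : List Int) = [] ∧ 0 < n))]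
    rw [PySem.List.pyRange_one_eq_nil hn]
    rfl
  · have hn0 : 0 < n := by omega
    by_cases hpar : n % 2 = 1
    · -- odd n : the center is appended first, then the loop
      have h2 : n - 1 = 2 * ((n - 1) / 2) := by omega
      rw [if_pos (show 0 ≤ (n - 1) / 2 ∧ n - 1 = 2 * ((n - 1) / 2) from ⟨by omega, h2⟩)]
      by_cases h1 : n = 1
      · subst h1
        norm_num
        rw [pvLoopA_nil 1 (-1) 1 (by norm_num) (by norm_num)]
        decide
      · -- the loop lemmas at m = (n-1)/2 - 1
        set l : Int := (n - 1) / 2 with hl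
        have hl1 : 1 ≤ l := by omega
        set m : Nat := (l - 1).toNat with hm
        have hmc : (m : Int) = l - 1 := by omega
        have hmn : 2 * (m : Int) + 2 ≤ n := by omega
        have hperm := pvLoopA_perm n m hmn
        obtain ⟨hpw, hbd⟩ := pvLoopA_pairwise n m hmn
        have hrw : pvLoopA n (l - 1) (l + 1) = pvLoopA n (m : Int) (n - 1 - (m : Int)) := by
          rw [hmc, show n - 1 - (l - 1) = l + 1 from by omega]
        rw [hrw, List.singleton_append]
        rw [if_neg (show ¬(l :: pvLoopA n (m : Int) (n - 1 - (m : Int)) = [] ∧ 0 < n) from by simp)]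
        refine (PySem.List.sorted_eq_of_perm_of_pairwise_lt _ _ _ ?_ ?_).symm
        · -- permutation with range(n)
          refine (hperm.cons l).trans ?_
          rw [show (m : Int) + 1 = l from by omega, show n - 1 - (m : Int) = l + 1 from by omega]
          rw [show PySem.List.pyRange 0 n 1 =
                PySem.List.pyRange 0 l 1 ++ PySem.List.pyRange l n 1 from
              PySem.List.pyRange_one_append 0 l n (by omega) (by omega),
             PySem.List.pyRange_one_cons (by omega : l < n)]
          exact List.perm_middle.symm
        · -- strictly increasing keys
          refine List.pairwise_cons.mpr ⟨?_, hpw⟩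
          intro b hb
          have := hbd b hb
          have hkl : |4 * l - 2 * n + 1| = 1 := by rw [abs_of_nonpos (by omega)]; omega
          rw [hkl]; omega
    · -- even n : the pre-step test fails, the loop does everything
      have h2 : 2 * ((n - 1) / 2) = n - 2 := by omega
      rw [if_neg (by omega : ¬(0 ≤ (n - 1) / 2 ∧ n - 1 = 2 * ((n - 1) / 2)))]
      simp only [List.nil_append]
      set l : Int := (n - 1) / 2 with hl
      set m : Nat := l.toNat with hm
      have hmc : (m : Int) = l := by omega
      have hmn : 2 * (m : Int) + 2 ≤ n := by omega
      have hperm := pvLoopA_perm n m hmn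
      obtain ⟨hpw, hbd⟩ := pvLoopA_pairwise n m hmn
      rw [show pvLoopA n l (l + 1) = pvLoopA n (m : Int) (n - 1 - (m : Int)) from by
            rw [hmc, show n - 1 - l = l + 1 from by omega]]
      rw [if_neg (show ¬(pvLoopA n (m : Int) (n - 1 - (m : Int)) = [] ∧ 0 < n) from by
        rw [pvLoopA_step n m]
        simp)]
      refine (PySem.List.sorted_eq_of_perm_of_pairwise_lt _ _ _ ?_ hpw).symm
      refine hperm.trans ?_
      rw [show n - 1 - (m : Int) = (m : Int) + 1 from by omega,
          ← PySem.List.pyRange_one_append 0 ((m : Int) + 1) n (by omega) (by omega)]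

-- ===== VERDICT (by name: the statement is the Claim_ definition above) =====
theorem get_center_out_order_spec : Claim_equal_get_center_out_order := by
  intro n _
  exact main_eq n
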